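-- pv_equiv track=rewrite | github.com/pinchiachen/pokemon-league | 0948.py | bagOfTokensScore
-- ===== SOURCE A (Python) =====
-- from typing import List
--
-- def bagOfTokensScore(tokens: List[int], P: int) -> int:
--     if not tokens: return 0
--     tokens = sorted(tokens)
--     score = 0
--     start = 0
--     end = len(tokens) - 1
--     while start <= end:
--         while start <= end and P >= tokens[start]:
--             P -= tokens[start]
--             start += 1
--             score += 1
--         if start < end and tokens[end] > tokens[start] and score > 0:
--             P += tokens[end]
--             end -= 1
--             score -= 1
--         else:
--             break
--     return score
-- ===== SOURCE B (Python) =====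
-- from typing import List
--
-- def bagOfTokensScore(tokens: List[int], P: int) -> int:
--     # Enumerate s = number of tokens sold back (the s most expensive ones).
--     # For each feasible s, buy greedily from the cheap end with the boosted
--     # power and record b - s; stop when an s-th sell could never be afforded.
--     t = sorted(tokens)
--     n = len(t)
--     best = 0
--     power = P   # P plus the sum of the s most expensive tokens
--     cost = 0    # sum of the s cheapest tokens (needed before the s-th sell)
--     s = 0
--     while True:
--         b, c = 0, 0   # buy the longest affordable cheap prefix outside the sold suffix
--         while b < n - s and c + t[b] <= power:
--             c += t[b]
--             b += 1
--         best = max(best, b - s)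
--         s += 1
--         if s > n or 2 * s - 1 > n:
--             break
--         cost += t[s - 1]
--         if cost > power:
--             break
--         power += t[n - s]
--     return best
-- ===== Notes on version B (the rewrite author's own statement) =====
-- stated objective: alternative
-- what changed: Instead of A's interleaved two-pointer simulation (inner buy loop, then sell-or-break), B enumerates the number s of tokens sold back: using prefix/suffix running sums it checks feasibility of the s-th sell and, for each feasible s, greedily scans the cheap prefix affordable with P plus the s most expensive tokens, taking the maximum of b - s.
import Mathlib
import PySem

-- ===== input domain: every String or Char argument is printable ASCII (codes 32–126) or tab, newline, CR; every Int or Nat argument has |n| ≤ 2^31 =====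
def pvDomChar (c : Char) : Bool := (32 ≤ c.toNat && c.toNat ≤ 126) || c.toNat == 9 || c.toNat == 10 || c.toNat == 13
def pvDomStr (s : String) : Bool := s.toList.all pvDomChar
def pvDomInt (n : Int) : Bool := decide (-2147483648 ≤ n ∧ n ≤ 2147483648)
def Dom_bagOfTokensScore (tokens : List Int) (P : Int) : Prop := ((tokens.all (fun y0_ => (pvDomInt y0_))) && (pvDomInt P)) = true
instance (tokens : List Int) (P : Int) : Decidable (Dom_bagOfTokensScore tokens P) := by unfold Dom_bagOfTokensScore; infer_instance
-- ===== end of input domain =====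

-- B replaces A's interleaved two-pointer simulation by a staged enumeration over s, the number of
-- tokens sold back: per s it checks the s-th sell's feasibility via running prefix/suffix sums and
-- scans the affordable cheap prefix afresh, maximising b - s; same return value, different algorithm.
-- Loops are ported with a fuel argument that only makes them total: fuel = window/stage bounds are
-- enough for every input, so no iteration is ever cut short.

-- ===== PORT A =====
-- tokens[i] on an in-range index: PySem.List.pyGetD (exact there; the programs only index in range)
def pvGet (t : List Int) (i : Int) : Int := PySem.List.pyGetD t i 0

-- inner 'while start <= end and P >= tokens[start]' loop of A; state (P, start, score);
-- called with fuel = window size (hi + 1 - lo).toNat, an upper bound on its iterations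
def pvBuyA (t : List Int) : Nat → Int → Int → Int → Int → Int × Int × Int
  | 0, P, lo, _hi, score => (P, lo, score)
  | fuel + 1, P, lo, hi, score =>
    if lo ≤ hi ∧ pvGet t lo ≤ P then pvBuyA t fuel (P - pvGet t lo) (lo + 1) hi (score + 1)
    else (P, lo, score)

-- outer 'while start <= end' loop of A: run the buy loop, then sell-or-break;
-- fuel = list length bounds the number of sells
def pvOuterA (t : List Int) : Nat → Int → Int → Int → Int → Int
  | 0, _P, _lo, _hi, score => score
  | fuel + 1, P, lo, hi, score =>
    if lo ≤ hi then
      if (pvBuyA t (hi + 1 - lo).toNat P lo hi score).2.1 < hi ∧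
         pvGet t (pvBuyA t (hi + 1 - lo).toNat P lo hi score).2.1 < pvGet t hi ∧
         0 < (pvBuyA t (hi + 1 - lo).toNat P lo hi score).2.2 then
        pvOuterA t fuel ((pvBuyA t (hi + 1 - lo).toNat P lo hi score).1 + pvGet t hi)
          ((pvBuyA t (hi + 1 - lo).toNat P lo hi score).2.1) (hi - 1)
          ((pvBuyA t (hi + 1 - lo).toNat P lo hi score).2.2 - 1)
      else (pvBuyA t (hi + 1 - lo).toNat P lo hi score).2.2
    else score

def bagOfTokensScore (tokens : List Int) (P : Int) : Int :=
  if tokens = [] then 0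
  else
    let t := PySem.List.sorted tokens (fun x => x) false
    pvOuterA t t.length P 0 ((t.length : Int) - 1) 0

-- ===== PORT B =====
-- inner 'while b < n - s and c + t[b] <= power' scan of Source B; returns b (c is dead after the loop);
-- fuel = (n - s).toNat bounds its iterations
def pvScanB (t : List Int) (power cap : Int) : Nat → Int → Int → Int
  | 0, b, _c => b
  | fuel + 1, b, c =>
    if b < cap ∧ c + pvGet t b ≤ power then pvScanB t power cap fuel (b + 1) (c + pvGet t b)
    else b

-- outer 'while True' stage loop of Source B over s; state (s, power, cost, best);
-- fuel = n + 1 bounds the number of stages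
def pvForB (t : List Int) (n : Int) : Nat → Int → Int → Int → Int → Int
  | 0, _s, _power, _cost, best => best
  | fuel + 1, s, power, cost, best =>
    let b := pvScanB t power (n - s) (n - s).toNat 0 0
    let best' := max best (b - s)
    if s + 1 > n ∨ 2 * (s + 1) - 1 > n then best'
    else
      let cost' := cost + pvGet t (s + 1 - 1)
      if cost' > power then best'
      else pvForB t n fuel (s + 1) (power + pvGet t (n - (s + 1))) cost' best'

def bagOfTokensScore_alt (tokens : List Int) (P : Int) : Int :=
  let t := PySem.List.sorted tokens (fun x => x) false
  pvForB t (t.length : Int) (t.length + 1) 0 P 0 0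

-- ===== PRECONDITION & SPEC =====
def Spec_bagOfTokensScore (tokens : List Int) (P : Int) (out : Int) : Prop := out = bagOfTokensScore_alt tokens P
instance (tokens : List Int) (P : Int) (out : Int) : Decidable (Spec_bagOfTokensScore tokens P out) := by unfold Spec_bagOfTokensScore; infer_instance

-- ===== CLAIM (what is proved, stated in full; the proofs are below) =====
def Claim_equal_bagOfTokensScore : Prop := ∀ (tokens : List Int) (P : Int), Dom_bagOfTokensScore tokens P → Spec_bagOfTokensScore tokens P (bagOfTokensScore tokens P)

-- ===== LEMMAS AND PROOFS =====

-- proof-side intermediate program: the flat two-pointer greedy with a running maximum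
-- (buy if affordable, else sell if any score, else stop); A is first proved equal to it,
-- and it is then proved equal to B's staged enumeration
def pvLoopB (t : List Int) : Nat → Int → Int → Int → Int → Int → Int
  | 0, _P, _lo, _hi, _score, ans => ans
  | fuel + 1, P, lo, hi, score, ans =>
    if lo ≤ hi then
      if pvGet t lo ≤ P then
        pvLoopB t fuel (P - pvGet t lo) (lo + 1) hi (score + 1) (max ans (score + 1))
      else if 0 < score then
        pvLoopB t fuel (P + pvGet t hi) lo (hi - 1) (score - 1) ans
      else ans
    else ans

-- prefix sum of the first k elements (k clamped to [0, n]); the proofs' view of Source B's running sums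
def pvPre (t : List Int) (k : Int) : Int := ((t.take k.toNat).sum)

lemma pvPre_zero (t : List Int) : pvPre t 0 = 0 := rfl

lemma pvPre_succ (t : List Int) {k : Int} (h0 : 0 ≤ k) (hk : k < (t.length : Int)) :
    pvPre t (k + 1) = pvPre t k + pvGet t k := by
  have hk' : k.toNat < t.length := by omega
  have h1 : (k + 1).toNat = k.toNat + 1 := by omega
  rw [pvPre, pvPre, h1, pvGet, PySem.List.pyGetD_eq_getElem t 0 h0 hk]
  rw [List.take_add_one, List.sum_append, List.getElem?_eq_getElem hk']
  simp

-- indexing a sorted list is monotone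
lemma pvGet_mono (t : List Int) (ht : List.Pairwise (· ≤ ·) t) {i j : Int}
    (h0 : 0 ≤ i) (hij : i ≤ j) (hj : j < (t.length : Int)) : pvGet t i ≤ pvGet t j := by
  have hi : i < (t.length : Int) := lt_of_le_of_lt hij hj
  have h0j : 0 ≤ j := le_trans h0 hij
  rw [pvGet, pvGet, PySem.List.pyGetD_eq_getElem t 0 h0 hi, PySem.List.pyGetD_eq_getElem t 0 h0j hj]
  rcases eq_or_lt_of_le hij with rfl | hlt
  · exact le_refl _
  · exact (List.pairwise_iff_getElem.mp ht) i.toNat j.toNat (by omega) (by omega) (by omega)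

-- the buy loop is a no-op when the next token is unaffordable (or the window is empty)
lemma pvBuyA_noop (t : List Int) (P lo hi score : Int)
    (h : ¬ (lo ≤ hi ∧ pvGet t lo ≤ P)) : ∀ fuel, pvBuyA t fuel P lo hi score = (P, lo, score)
  | 0 => rfl
  | fuel + 1 => by rw [pvBuyA, if_neg h]

-- the outer loop of A returns score at once on an empty window, whatever the fuel
lemma pvOuterA_stop (t : List Int) (P lo hi score : Int) (h : ¬ lo ≤ hi) :
    ∀ fuel, pvOuterA t fuel P lo hi score = score
  | 0 => rfl
  | fuel + 1 => by rw [pvOuterA, if_neg h]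

-- the flat loop returns ans at once on an empty window, whatever the fuel
lemma pvLoopB_stop (t : List Int) (P lo hi score ans : Int) (h : ¬ lo ≤ hi) :
    ∀ fuel, pvLoopB t fuel P lo hi score ans = ans
  | 0 => rfl
  | fuel + 1 => by rw [pvLoopB, if_neg h]

-- one affordable buy commutes with the whole outer loop of A (its fuel is untouched:
-- buys happen inside the inner loop)
lemma pvOuterA_buy (t : List Int) (P lo hi score : Int) (k : Nat)
    (hle : lo ≤ hi) (hb : pvGet t lo ≤ P) :
    pvOuterA t (k + 1) P lo hi score = pvOuterA t (k + 1) (P - pvGet t lo) (lo + 1) hi (score + 1) := by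
  have hfuel : (hi + 1 - lo).toNat = (hi + 1 - (lo + 1)).toNat + 1 := by omega
  have hstep : pvBuyA t (hi + 1 - lo).toNat P lo hi score
      = pvBuyA t (hi + 1 - (lo + 1)).toNat (P - pvGet t lo) (lo + 1) hi (score + 1) := by
    rw [hfuel, pvBuyA, if_pos ⟨hle, hb⟩]
  by_cases h2 : lo + 1 ≤ hi
  · rw [pvOuterA, if_pos hle, hstep]
    conv_rhs => rw [pvOuterA, if_pos h2]
  · -- lo = hi: exactly one buy happens, then both sides return score + 1
    have hno : pvBuyA t (hi + 1 - (lo + 1)).toNat (P - pvGet t lo) (lo + 1) hi (score + 1)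
        = (P - pvGet t lo, lo + 1, score + 1) := pvBuyA_noop t _ _ _ _ (by omega) _
    rw [pvOuterA, if_pos hle, hstep, hno, pvOuterA_stop t _ _ _ _ h2 (k + 1)]
    have : ¬ ((P - pvGet t lo, lo + 1, score + 1).2.1 < hi ∧
        pvGet t (P - pvGet t lo, lo + 1, score + 1).2.1 < pvGet t hi ∧
        0 < (P - pvGet t lo, lo + 1, score + 1).2.2) := by
      intro hcon
      have hx : lo + 1 < hi := hcon.1
      omega
    rw [if_neg this]

-- A's outer loop never returns less than the current score (P nonnegative, enough fuel)
lemma pvOuterA_ge (t : List Int) : ∀ (n fa : Nat) (P lo hi score : Int),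
    (hi + 1 - lo).toNat = n → n ≤ fa → 0 ≤ P →
    score ≤ pvOuterA t fa P lo hi score := by
  intro n
  induction n using Nat.strong_induction_on with
  | _ n IH =>
    intro fa P lo hi score hn hfa hP
    by_cases hle : lo ≤ hi
    · obtain ⟨k, rfl⟩ : ∃ k, fa = k + 1 := ⟨fa - 1, by omega⟩
      by_cases hb : pvGet t lo ≤ P
      · rw [pvOuterA_buy t P lo hi score k hle hb]
        have := IH (hi + 1 - (lo + 1)).toNat (by omega) (k + 1) (P - pvGet t lo) (lo + 1) hi
          (score + 1) rfl (by omega) (by omega)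
        omega
      · have hno := pvBuyA_noop t P lo hi score (by tauto) (hi + 1 - lo).toNat
        rw [pvOuterA, if_pos hle, hno]
        by_cases hc : lo < hi ∧ pvGet t lo < pvGet t hi ∧ 0 < score
        · rw [if_pos (show (P, lo, score).2.1 < hi ∧
            pvGet t (P, lo, score).2.1 < pvGet t hi ∧ 0 < (P, lo, score).2.2 from hc)]
          obtain ⟨h1, h2, h3⟩ := hc
          obtain ⟨k', rfl⟩ : ∃ k', k = k' + 1 := ⟨k - 1, by omega⟩
          have hbuy2 : pvGet t lo ≤ P + pvGet t hi := by omega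
          rw [pvOuterA_buy t (P + pvGet t hi) lo (hi - 1) (score - 1) k' (by omega) hbuy2]
          have harg2 : score - 1 + 1 = score := by ring
          rw [harg2]
          have := IH (hi - 1 + 1 - (lo + 1)).toNat (by omega) (k' + 1)
            (P + pvGet t hi - pvGet t lo) (lo + 1) (hi - 1) score rfl (by omega) (by omega)
          omega
        · rw [if_neg (show ¬ ((P, lo, score).2.1 < hi ∧
            pvGet t (P, lo, score).2.1 < pvGet t hi ∧ 0 < (P, lo, score).2.2) from hc)]
    · rw [pvOuterA_stop t P lo hi score hle fa]

-- simulation lemma: the flat loop computes max ans (A's outer-loop value)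
lemma pvLoopB_eq (t : List Int) (ht : List.Pairwise (· ≤ ·) t) : ∀ (n fa fb : Nat) (P lo hi score ans : Int),
    (hi + 1 - lo).toNat = n → n ≤ fa → n ≤ fb → 0 ≤ lo → hi < (t.length : Int) →
    score ≤ ans → (0 < score → 0 ≤ P) →
    pvLoopB t fb P lo hi score ans = max ans (pvOuterA t fa P lo hi score) := by
  intro n
  induction n using Nat.strong_induction_on with
  | _ n IH =>
    intro fa fb P lo hi score ans hn hfa hfb hlo hhi hans hsc
    by_cases hle : lo ≤ hi
    · obtain ⟨k, rfl⟩ : ∃ k, fa = k + 1 := ⟨fa - 1, by omega⟩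
      obtain ⟨m, rfl⟩ : ∃ m, fb = m + 1 := ⟨fb - 1, by omega⟩
      by_cases hb : pvGet t lo ≤ P
      · -- buy step on both sides
        rw [pvLoopB, if_pos hle, if_pos hb]
        rw [IH (hi + 1 - (lo + 1)).toNat (by omega) (k + 1) m (P - pvGet t lo) (lo + 1) hi
          (score + 1) (max ans (score + 1)) rfl (by omega) (by omega) (by omega) hhi
          (le_max_right _ _) (by omega)]
        rw [pvOuterA_buy t P lo hi score k hle hb]
        have hge := pvOuterA_ge t (hi + 1 - (lo + 1)).toNat (k + 1) (P - pvGet t lo) (lo + 1) hi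
          (score + 1) rfl (by omega) (by omega)
        omega
      · by_cases hs : 0 < score
        · have hP : 0 ≤ P := hsc hs
          have hno := pvBuyA_noop t P lo hi score (by tauto) (hi + 1 - lo).toNat
          rw [pvLoopB, if_pos hle, if_neg hb, if_pos hs]
          by_cases hc : lo < hi ∧ pvGet t lo < pvGet t hi
          · -- genuine sell in both programs
            rw [IH (hi - 1 + 1 - lo).toNat (by omega) k m (P + pvGet t hi) lo (hi - 1)
              (score - 1) ans rfl (by omega) (by omega) hlo (by omega) (by omega) (by omega)]
            rw [pvOuterA, if_pos hle, hno]
            rw [if_pos (show (P, lo, score).2.1 < hi ∧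
              pvGet t (P, lo, score).2.1 < pvGet t hi ∧ 0 < (P, lo, score).2.2 from ⟨hc.1, hc.2, hs⟩)]
          · -- A breaks here; the flat loop sells (and possibly buys back an equal token), ans unchanged
            have hA : pvOuterA t (k + 1) P lo hi score = score := by
              rw [pvOuterA, if_pos hle, hno]
              rw [if_neg (show ¬ ((P, lo, score).2.1 < hi ∧
                pvGet t (P, lo, score).2.1 < pvGet t hi ∧ 0 < (P, lo, score).2.2) by
                  intro hcon; exact hc ⟨hcon.1, hcon.2.1⟩)]
            by_cases h2 : lo ≤ hi - 1
            · -- window still nonempty: tokens at lo and hi are equal; the flat loop buys straight back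
              have hmono := pvGet_mono t ht (i := lo) (j := hi) hlo (by omega) hhi
              have hv : pvGet t hi = pvGet t lo := by
                have : ¬ (pvGet t lo < pvGet t hi) := fun hlt => hc ⟨by omega, hlt⟩
                omega
              obtain ⟨m', rfl⟩ : ∃ m', m = m' + 1 := ⟨m - 1, by omega⟩
              have hb2 : pvGet t lo ≤ P + pvGet t hi := by omega
              rw [pvLoopB, if_pos h2, if_pos hb2]
              have harg : P + pvGet t hi - pvGet t lo = P := by omega
              have harg2 : score - 1 + 1 = score := by ring
              rw [harg, harg2,
                IH (hi - 1 + 1 - (lo + 1)).toNat (by omega) (k + 1) m' P (lo + 1) (hi - 1) score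
                  (max ans score) rfl (by omega) (by omega) (by omega) (by omega)
                  (le_max_right _ _) hsc]
              have hrest : pvOuterA t (k + 1) P (lo + 1) (hi - 1) score = score := by
                by_cases h3 : lo + 1 ≤ hi - 1
                · have hmono2 := pvGet_mono t ht (i := lo) (j := lo + 1) hlo (by omega) (by omega)
                  have hmono3 := pvGet_mono t ht (i := hi - 1) (j := hi) (by omega) (by omega) hhi
                  have hno2 := pvBuyA_noop t P (lo + 1) (hi - 1) score (by
                    intro hcon; omega) (hi - 1 + 1 - (lo + 1)).toNat
                  rw [pvOuterA, if_pos h3, hno2]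
                  rw [if_neg (show ¬ ((P, lo + 1, score).2.1 < hi - 1 ∧
                    pvGet t (P, lo + 1, score).2.1 < pvGet t (hi - 1) ∧
                    0 < (P, lo + 1, score).2.2) by
                      intro hcon
                      have hx : pvGet t (lo + 1) < pvGet t (hi - 1) := hcon.2.1
                      omega)]
                · rw [pvOuterA_stop t P (lo + 1) (hi - 1) score h3 (k + 1)]
              rw [hrest, hA]
              omega
            · -- lo = hi: the sell empties the window
              rw [pvLoopB_stop t _ _ _ _ _ h2 m, hA]
              omega
        · -- no score to sell: both stop
          rw [pvLoopB, if_pos hle, if_neg hb, if_neg hs]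
          have hno := pvBuyA_noop t P lo hi score (by tauto) (hi + 1 - lo).toNat
          rw [pvOuterA, if_pos hle, hno]
          rw [if_neg (show ¬ ((P, lo, score).2.1 < hi ∧
            pvGet t (P, lo, score).2.1 < pvGet t hi ∧ 0 < (P, lo, score).2.2) by
              intro hcon
              have hx : (0 : Int) < score := hcon.2.2
              omega)]
          show ans = max ans score
          omega
    · rw [pvLoopB_stop t P lo hi score ans hle fb, pvOuterA_stop t P lo hi score hle fa]
      omega

-- the flat loop's value does not depend on the fuel once it covers the window size
lemma pvLoopB_fuel (t : List Int) : ∀ (w f1 f2 : Nat) (P lo hi score ans : Int),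
    (hi + 1 - lo).toNat = w → w ≤ f1 → w ≤ f2 →
    pvLoopB t f1 P lo hi score ans = pvLoopB t f2 P lo hi score ans := by
  intro w
  induction w using Nat.strong_induction_on with
  | _ w IH =>
    intro f1 f2 P lo hi score ans hw h1 h2
    by_cases hle : lo ≤ hi
    · obtain ⟨a, rfl⟩ : ∃ a, f1 = a + 1 := ⟨f1 - 1, by omega⟩
      obtain ⟨b, rfl⟩ : ∃ b, f2 = b + 1 := ⟨f2 - 1, by omega⟩
      rw [pvLoopB, pvLoopB, if_pos hle, if_pos hle]
      by_cases hb : pvGet t lo ≤ P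
      · rw [if_pos hb, if_pos hb]
        exact IH (hi + 1 - (lo + 1)).toNat (by omega) a b _ _ _ _ _ rfl (by omega) (by omega)
      · rw [if_neg hb, if_neg hb]
        by_cases hs : 0 < score
        · rw [if_pos hs, if_pos hs]
          exact IH (hi - 1 + 1 - lo).toNat (by omega) a b _ _ _ _ _ rfl (by omega) (by omega)
        · rw [if_neg hs, if_neg hs]
    · rw [pvLoopB_stop t _ _ _ _ _ hle f1, pvLoopB_stop t _ _ _ _ _ hle f2]

-- characterisation of Source B's scan: starting at b with its true running cost, it stops at the
-- first index whose prefix no longer fits in power (or at the cap)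
lemma pvScanB_spec (t : List Int) (W cap : Int) (hcap : cap ≤ (t.length : Int)) :
    ∀ (fuel : Nat) (b : Int), 0 ≤ b → (cap - b).toNat ≤ fuel →
    b ≤ pvScanB t W cap fuel b (pvPre t b) ∧
    pvScanB t W cap fuel b (pvPre t b) ≤ max cap b ∧
    (∀ k : Int, b ≤ k → k < pvScanB t W cap fuel b (pvPre t b) → pvPre t (k + 1) ≤ W) ∧
    (cap ≤ pvScanB t W cap fuel b (pvPre t b) ∨ W < pvPre t (pvScanB t W cap fuel b (pvPre t b) + 1)) := by
  intro fuel
  induction fuel with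
  | zero =>
    intro b hb hf
    have hcb : cap ≤ b := by omega
    rw [pvScanB]
    exact ⟨le_refl _, le_max_right _ _, fun k hk1 hk2 => absurd (lt_of_le_of_lt hk1 hk2) (lt_irrefl _), Or.inl hcb⟩
  | succ fuel IH =>
    intro b hb hf
    rw [pvScanB]
    by_cases hc : b < cap ∧ pvPre t b + pvGet t b ≤ W
    · rw [if_pos hc]
      have hbn : b < (t.length : Int) := lt_of_lt_of_le hc.1 hcap
      have hps : pvPre t b + pvGet t b = pvPre t (b + 1) := (pvPre_succ t hb hbn).symm
      rw [hps]
      obtain ⟨i1, i2, i3, i4⟩ := IH (b + 1) (by omega) (by omega)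
      refine ⟨by omega, by omega, ?_, i4⟩
      intro k hk1 hk2
      rcases eq_or_lt_of_le hk1 with rfl | hlt
      · rw [← hps]; exact hc.2
      · exact i3 k (by omega) hk2
    · rw [if_neg hc]
      refine ⟨le_refl _, le_max_right _ _, fun k hk1 hk2 => absurd (lt_of_le_of_lt hk1 hk2) (lt_irrefl _), ?_⟩
      by_cases h1 : b < cap
      · have h2 : W < pvPre t b + pvGet t b := by
          by_contra h3
          exact hc ⟨h1, by omega⟩
        have hbn : b < (t.length : Int) := lt_of_lt_of_le h1 hcap
        rw [pvPre_succ t hb hbn] at *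
        exact Or.inr h2
      · exact Or.inl (by omega)

-- the flat loop runs through a block of affordable buys: from lo it reaches the stopping point b
-- with the same fuel, accumulating the running maximum
lemma pvLoopB_buyrun (t : List Int) : ∀ (d : Nat) (W lo b s hi ans : Int) (fuel : Nat),
    (b - lo).toNat = d → 0 ≤ lo → lo ≤ b → b ≤ hi + 1 → b ≤ (t.length : Int) →
    (∀ k : Int, lo ≤ k → k < b → pvPre t (k + 1) ≤ W) →
    (hi + 1 - lo).toNat ≤ fuel → lo - s ≤ ans →
    pvLoopB t fuel (W - pvPre t lo) lo hi (lo - s) ans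
      = pvLoopB t fuel (W - pvPre t b) b hi (b - s) (max ans (b - s)) := by
  intro d
  induction d with
  | zero =>
    intro W lo b s hi ans fuel hd h0 hlb hbh hbn hpre hf hans
    have hb : b = lo := by omega
    subst hb
    rw [max_eq_left hans]
  | succ d IH =>
    intro W lo b s hi ans fuel hd h0 hlb hbh hbn hpre hf hans
    have hlo : lo < b := by omega
    have hle : lo ≤ hi := by omega
    have hlon : lo < (t.length : Int) := by omega
    obtain ⟨f, rfl⟩ : ∃ f, fuel = f + 1 := ⟨fuel - 1, by omega⟩
    have hbuy : pvGet t lo ≤ W - pvPre t lo := by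
      have := hpre lo (le_refl _) hlo
      rw [pvPre_succ t h0 hlon] at this
      omega
    rw [pvLoopB, if_pos hle, if_pos hbuy]
    have e1 : W - pvPre t lo - pvGet t lo = W - pvPre t (lo + 1) := by
      rw [pvPre_succ t h0 hlon]; ring
    have e2 : lo - s + 1 = lo + 1 - s := by ring
    rw [e1, e2]
    rw [IH W (lo + 1) b s hi (max ans (lo + 1 - s)) f (by omega) (by omega) (by omega) hbh hbn
      (fun k hk1 hk2 => hpre k (by omega) hk2) (by omega) (le_max_right _ _)]
    rw [max_assoc, max_eq_right (by omega : lo + 1 - s ≤ b - s)]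
    exact pvLoopB_fuel t (hi + 1 - b).toNat f (f + 1) _ _ _ _ _ rfl (by omega) (by omega)

-- once best already dominates every later stage's bound n - 2s, B's stage loop returns best
lemma pvForB_const (t : List Int) (n : Int) (hn : n = (t.length : Int)) :
    ∀ (fuel : Nat) (s W cost best : Int), 0 ≤ s → 0 ≤ best → n - 2 * s ≤ best →
    pvForB t n fuel s W cost best = best := by
  intro fuel
  induction fuel with
  | zero => intro s W cost best _ _ _; rfl
  | succ fuel IH =>
    intro s W cost best hs hb hbound
    rw [pvForB]
    have hspec := pvScanB_spec t W (n - s) (by omega) (n - s).toNat 0 (le_refl _) (by omega)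
    rw [pvPre_zero] at hspec
    obtain ⟨s1, s2, _, _⟩ := hspec
    have hmax : max best (pvScanB t W (n - s) (n - s).toNat 0 0 - s) = best := by
      by_cases h : n - s ≤ 0
      · have : max (n - s) 0 = 0 := by omega
        rw [this] at s2
        exact max_eq_left (by omega)
      · have : max (n - s) 0 = n - s := by omega
        rw [this] at s2
        exact max_eq_left (by omega)
    simp only [hmax]
    by_cases hbr : s + 1 > n ∨ 2 * (s + 1) - 1 > n
    · rw [if_pos hbr]
    · rw [if_neg hbr]
      by_cases hcost : cost + pvGet t (s + 1 - 1) > W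
      · rw [if_pos hcost]
      · rw [if_neg hcost]
        exact IH (s + 1) _ _ best (by omega) hb (by omega)

-- main bridge: at the entry of stage s the flat greedy (at its true state) and B's stage loop agree
lemma pvAlign (t : List Int) (ht : List.Pairwise (· ≤ ·) t) (n : Int) (hn : n = (t.length : Int)) :
    ∀ (fF fB : Nat) (W lo s ans : Int),
    0 ≤ s → s ≤ lo → lo ≤ n - s →
    (∀ k : Int, 1 ≤ k → k ≤ lo → pvPre t k ≤ W) →
    0 ≤ ans → lo - s ≤ ans →
    (n - s - lo).toNat ≤ fB → (n + 1 - s).toNat ≤ fF →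
    pvLoopB t fB (W - pvPre t lo) lo (n - 1 - s) (lo - s) ans = pvForB t n fF s W (pvPre t s) ans := by
  intro fF
  induction fF with
  | zero =>
    intro fB W lo s ans hs hsl hln hinv ha1 ha2 hfB hfF
    omega
  | succ fF IH =>
    intro fB W lo s ans hs hsl hln hinv ha1 ha2 hfB hfF
    rw [pvForB]
    set cap : Int := n - s with hcap
    have hcapn : cap ≤ (t.length : Int) := by omega
    have hspec := pvScanB_spec t W cap hcapn cap.toNat 0 (le_refl _) (by omega)
    rw [pvPre_zero] at hspec
    set b : Int := pvScanB t W cap cap.toNat 0 0 with hbdef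
    obtain ⟨s1, s2, s3, s4⟩ := hspec
    have hmaxcap : max cap (0 : Int) = cap := by omega
    rw [hmaxcap] at s2
    -- the scan passes the already-bought prefix: lo ≤ b
    have hlob : lo ≤ b := by
      by_contra hcon
      push Not at hcon
      rcases s4 with hc | hfail
      · omega
      · have := hinv (b + 1) (by omega) (by omega)
        omega
    -- run the flat loop's buys up to b
    rw [pvLoopB_buyrun t (b - lo).toNat W lo b s (n - 1 - s) ans fB rfl (by omega) hlob
      (by omega) (by omega) (fun k hk1 hk2 => s3 k (by omega) hk2) (by omega) ha2]
    rcases eq_or_lt_of_le s2 with hbc | hblt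
    · -- case b = cap: the window is exhausted; later stages can never beat best'
      have hstop : ¬ (b ≤ n - 1 - s) := by omega
      rw [pvLoopB_stop t _ _ _ _ _ hstop fB]
      by_cases hbr : s + 1 > n ∨ 2 * (s + 1) - 1 > n
      · rw [if_pos hbr]
      · rw [if_neg hbr]
        push Not at hbr
        have hsn : s < (t.length : Int) := by omega
        have e1 : s + 1 - 1 = s := by ring
        rw [e1, ← pvPre_succ t hs (by omega)]
        by_cases hcost : pvPre t (s + 1) > W
        · rw [if_pos hcost]
        · rw [if_neg hcost]
          exact (pvForB_const t n hn fF (s + 1) _ _ _ (by omega) (by omega) (by omega)).symm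
    · -- case b < cap: the flat loop is stuck at b
      have hbwin : b ≤ n - 1 - s := by omega
      have hbn2 : b < (t.length : Int) := by omega
      have hfail : W < pvPre t (b + 1) := by
        rcases s4 with hc | hf
        · omega
        · exact hf
      have hnobuy : ¬ (pvGet t b ≤ W - pvPre t b) := by
        rw [pvPre_succ t (by omega) hbn2] at hfail
        omega
      obtain ⟨f, rfl⟩ : ∃ f, fB = f + 1 := ⟨fB - 1, by omega⟩
      rw [pvLoopB, if_pos hbwin, if_neg hnobuy]
      by_cases hscore : 0 < b - s
      · -- sell step: move to stage s + 1
        rw [if_pos hscore]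
        have hpreb : pvPre t b ≤ W := by
          have := s3 (b - 1) (by omega) (by omega)
          have e : b - 1 + 1 = b := by ring
          rw [e] at this
          exact this
        have htb : 0 < pvGet t b := by
          rw [pvPre_succ t (by omega) hbn2] at hfail
          omega
        have hhi : 0 < pvGet t (n - 1 - s) := by
          have := pvGet_mono t ht (i := b) (j := n - 1 - s) (by omega) hbwin (by omega)
          omega
        set W' : Int := W + pvGet t (n - 1 - s) with hW'
        have e1 : W - pvPre t b + pvGet t (n - 1 - s) = W' - pvPre t b := by ring
        have e2 : b - s - 1 = b - (s + 1) := by ring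
        have e3 : n - 1 - s - 1 = n - 1 - (s + 1) := by ring
        rw [e1, e2, e3]
        rw [IH f W' b (s + 1) (max ans (b - s)) (by omega) (by omega) (by omega)
          (fun k hk1 hk2 => by
            have := s3 (k - 1) (by omega) (by omega)
            have e : k - 1 + 1 = k := by ring
            rw [e] at this
            omega)
          (by omega) (by omega) (by omega) (by omega)]
        -- B's stage loop takes the same step
        have hbr : ¬ (s + 1 > n ∨ 2 * (s + 1) - 1 > n) := by
          push Not
          omega
        rw [if_neg hbr]
        have e4 : s + 1 - 1 = s := by ring
        rw [e4, ← pvPre_succ t hs (by omega)]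
        have hcost : ¬ (pvPre t (s + 1) > W) := by
          have := s3 s (by omega) (by omega)
          omega
        rw [if_neg hcost]
        have e5 : n - (s + 1) = n - 1 - s := by ring
        rw [e5]
      · -- stuck with no score: both sides stop with ans
        rw [if_neg hscore]
        have hbs : b = s := by omega
        have hmax : max ans (b - s) = ans := max_eq_left (by omega)
        rw [hmax]
        by_cases hbr : s + 1 > n ∨ 2 * (s + 1) - 1 > n
        · rw [if_pos hbr]
        · rw [if_neg hbr]
          have e4 : s + 1 - 1 = s := by ring
          rw [e4, ← pvPre_succ t hs (by omega)]
          have hcost : pvPre t (s + 1) > W := by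
            rw [hbs] at hfail
            exact hfail
          rw [if_pos hcost]

-- ===== VERDICT (by name: the statement is the Claim_ definition above) =====
theorem bagOfTokensScore_spec : Claim_equal_bagOfTokensScore := by
  intro tokens P _
  show bagOfTokensScore tokens P = bagOfTokensScore_alt tokens P
  by_cases hemp : tokens = []
  · subst hemp
    rw [bagOfTokensScore, if_pos rfl, bagOfTokensScore_alt]
    rfl
  · rw [bagOfTokensScore, if_neg hemp, bagOfTokensScore_alt]
    set t := PySem.List.sorted tokens (fun x => x) false with hts
    have ht : List.Pairwise (· ≤ ·) t := PySem.List.sorted_pairwise tokens (fun x => x)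
    have hlen : t.length = tokens.length := PySem.List.length_sorted tokens _ _
    have hpos : 0 < t.length := by
      rw [hlen]; exact List.length_pos_iff.mpr hemp
    have hhi : (t.length : Int) - 1 < (t.length : Int) := by omega
    -- A's outer loop equals the flat greedy with a running maximum
    have hflat : pvOuterA t t.length P 0 ((t.length : Int) - 1) 0
        = pvLoopB t t.length P 0 ((t.length : Int) - 1) 0 0 := by
      rw [pvLoopB_eq t ht ((t.length : Int) - 1 + 1 - 0).toNat t.length t.length P 0
        ((t.length : Int) - 1) 0 0 rfl (by omega) (by omega) le_rfl hhi le_rfl (by omega)]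
      have hge : 0 ≤ pvOuterA t t.length P 0 ((t.length : Int) - 1) 0 := by
        obtain ⟨k, hk⟩ : ∃ k, t.length = k + 1 := ⟨t.length - 1, by omega⟩
        set L : Int := (t.length : Int) - 1 with hL
        rw [hk]
        by_cases hb : pvGet t 0 ≤ P
        · rw [pvOuterA_buy t P 0 L 0 k (by omega) hb]
          have := pvOuterA_ge t (L + 1 - (0 + 1)).toNat (k + 1) (P - pvGet t 0)
            (0 + 1) L (0 + 1) rfl (by omega) (by omega)
          omega
        · have hno := pvBuyA_noop t P 0 L 0 (by tauto) ((L + 1 - 0).toNat)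
          rw [pvOuterA, if_pos (by omega : (0 : Int) ≤ L), hno]
          rw [if_neg (show ¬ ((P, (0 : Int), (0 : Int)).2.1 < L ∧
              pvGet t (P, (0 : Int), (0 : Int)).2.1 < pvGet t L ∧
              0 < (P, (0 : Int), (0 : Int)).2.2) by simp)]
      omega
    rw [hflat]
    -- the flat greedy equals B's stage loop (stage 0)
    have halign := pvAlign t ht (t.length : Int) rfl (t.length + 1) t.length P 0 0 0
      le_rfl le_rfl (by omega) (fun k hk1 hk2 => by omega) le_rfl le_rfl (by omega) (by omega)
    rw [pvPre_zero] at halign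
    have e1 : P - 0 = P := by ring
    have e2 : (t.length : Int) - 1 - 0 = (t.length : Int) - 1 := by ring
    have e3 : (0 : Int) - 0 = 0 := by ring
    rw [e1, e2, e3] at halign
    exact halign
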